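-- pv_equiv track=rewrite | github.com/zt-yang/pybullet_planning | pddl_domains/pddl_utils.py | parse_domain
-- ===== SOURCE A (Python) =====
-- OPERATOR_KEY = '(:action '
--
-- AXIOM_KEY = '(:derived '
--
-- def get_uncommented_splits_by_key(pddl_content, key):
--     """ avoids commented """
--     all_lines = pddl_content.split(key)
--     new_lines = []
--     for i in range(len(all_lines)):
--         if i > 0 and all_lines[i - 1].endswith(';'):
--             continue
--         line = all_lines[i]
--         if line.endswith(';'):
--             line = line[:-1]
--         new_lines.append(line)
--     return new_lines
--
-- def remove_the_last_end_bracket(lines):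
--     for i in range(len(lines)):
--         index = len(lines) - i - 1
--         if lines[index].strip() == ')':
--             lines = lines[:index]
--             break
--     return lines
--
-- def clean_operator_lines(lines, return_blocks=False):
--     key1 = OPERATOR_KEY
--     key2 = AXIOM_KEY
--     lines = ''.join(lines).replace(key2, key1 + key2)
--     blocks = get_uncommented_splits_by_key(lines, key1)
--     new_blocks = []
--     for block in blocks:
--         old_lines = block.split('\n')
--         new_lines = []
--         for line in old_lines:
--             if ';' in line:
--                 line = line[:line.index(';')]
--                 if len(line.strip()) == 0:
--                     continue
--             new_lines.append(line)
--         if len(new_lines) > 2 and ')' in new_lines[-2]: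
--             new_lines.append(' ')
--         new_blocks.append('\n'.join(new_lines))
--     if return_blocks:
--         return [key1+s if not s.startswith(key2) else s for s in blocks[1:]]
--     lines = key1.join(new_blocks).replace(key1 + key2, key2)
--     lines = [l+'\n' for l in lines.split('\n')]
--     return lines
--
-- def parse_domain(domain_lines):
--     header = []
--     predicates = []
--     functions = None
--
--     lines = []
--     for line in domain_lines:
--         if '(:predicates' in line:
--             header += lines
--             lines = []
--
--         elif '(:functions' in line:
--             predicates += remove_the_last_end_bracket(lines)
--             lines = []
--
--         elif '(:action' in line and len(predicates) == 0:
--             predicates += remove_the_last_end_bracket(lines)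
--             lines = [line]
--             functions = []
--
--         elif '(:action' in line and functions is None:
--             functions = lines
--             lines = [line]
--
--         else:
--             lines.append(line)
--
--     operators_axioms = remove_the_last_end_bracket(lines)
--     operators_axioms = clean_operator_lines(operators_axioms)
--     return header, predicates, functions, operators_axioms
-- ===== SOURCE B (Python) =====
-- OPERATOR_KEY = '(:action '
--
-- AXIOM_KEY = '(:derived '
--
-- def get_uncommented_splits_by_key(pddl_content, key):
--     """ avoids commented """
--     all_lines = pddl_content.split(key)
--     new_lines = []
--     for i in range(len(all_lines)):
--         if i > 0 and all_lines[i - 1].endswith(';'):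
--             continue
--         line = all_lines[i]
--         if line.endswith(';'):
--             line = line[:-1]
--         new_lines.append(line)
--     return new_lines
--
-- def remove_the_last_end_bracket(lines):
--     for i in range(len(lines)):
--         index = len(lines) - i - 1
--         if lines[index].strip() == ')':
--             lines = lines[:index]
--             break
--     return lines
--
-- def clean_operator_lines(lines, return_blocks=False):
--     key1 = OPERATOR_KEY
--     key2 = AXIOM_KEY
--     lines = ''.join(lines).replace(key2, key1 + key2)
--     blocks = get_uncommented_splits_by_key(lines, key1)
--     new_blocks = []
--     for block in blocks:
--         old_lines = block.split('\n')
--         new_lines = []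
--         for line in old_lines:
--             if ';' in line:
--                 line = line[:line.index(';')]
--                 if len(line.strip()) == 0:
--                     continue
--             new_lines.append(line)
--         if len(new_lines) > 2 and ')' in new_lines[-2]:
--             new_lines.append(' ')
--         new_blocks.append('\n'.join(new_lines))
--     if return_blocks:
--         return [key1+s if not s.startswith(key2) else s for s in blocks[1:]]
--     lines = key1.join(new_blocks).replace(key1 + key2, key2)
--     lines = [l+'\n' for l in lines.split('\n')]
--     return lines
--
-- def parse_domain(domain_lines):
--     # Marker-jump decomposition: instead of a per-line state machine, repeatedly
--     # locate the next *effective* marker line and move whole slices at once.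
--     header, predicates, functions = [], [], None
--     pending = []          # lines carried over past the previous action marker
--     rest = list(domain_lines)
--     while True:
--         i = next((k for k, ln in enumerate(rest)
--                   if '(:predicates' in ln or '(:functions' in ln
--                   or ('(:action' in ln and (not predicates or functions is None))),
--                  None)
--         if i is None:
--             tail = pending + rest
--             break
--         seg = pending + rest[:i]
--         line = rest[i]
--         rest = rest[i + 1:]
--         if '(:predicates' in line:
--             header += seg
--             pending = []
--         elif '(:functions' in line:
--             predicates += remove_the_last_end_bracket(seg)
--             pending = []
--         elif not predicates:
--             predicates += remove_the_last_end_bracket(seg)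
--             pending = [line]
--             functions = []
--         else:
--             functions = seg
--             pending = [line]
--     operators_axioms = clean_operator_lines(remove_the_last_end_bracket(tail))
--     return header, predicates, functions, operators_axioms
-- ===== Notes on version B (the rewrite author's own statement) =====
-- stated objective: alternative
-- what changed: Replaces A's per-line four-state accumulator loop by a marker-jump scan: repeatedly find the index of the next effective marker line ('(:predicates'/'(:functions'/state-dependent '(:action') and move the whole slice before it into the right section at once.
import Mathlib
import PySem

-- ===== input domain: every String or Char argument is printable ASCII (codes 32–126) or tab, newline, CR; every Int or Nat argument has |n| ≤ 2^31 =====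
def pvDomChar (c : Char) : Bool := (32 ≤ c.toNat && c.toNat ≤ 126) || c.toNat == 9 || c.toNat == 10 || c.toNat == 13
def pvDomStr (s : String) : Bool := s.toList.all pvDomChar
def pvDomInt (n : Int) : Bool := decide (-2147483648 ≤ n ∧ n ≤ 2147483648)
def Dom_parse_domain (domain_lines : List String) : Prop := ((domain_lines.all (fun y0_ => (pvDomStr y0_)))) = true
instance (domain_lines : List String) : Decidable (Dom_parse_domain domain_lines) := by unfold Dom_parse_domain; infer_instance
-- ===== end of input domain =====

-- B replaces A's per-line four-state accumulator loop by a marker-jump scan (find next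
-- effective marker line, move whole slices at once); same return value, objective: alternative.

-- ===== PORT A =====
-- shared helpers (identical source code in Source A and Source B, ported once)

-- get_uncommented_splits_by_key inner loop: prev = all_lines[i-1] (original), skip if it ends in ';'
def pvGusbkGo : Option String → List String → List String
  | _, [] => []
  | prev, x :: xs =>
    let tail := pvGusbkGo (some x) xs
    if (prev.map (fun p => PySem.Str.endswith p ";")).getD false then tail
    else (if PySem.Str.endswith x ";" then PySem.Str.slice x none (some (-1)) else x) :: tail

def get_uncommented_splits_by_key (pddl_content : String) (key : String) : List String :=
  -- key is the nonempty literal '(:action ' at every call site, so split? is never none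
  let all_lines := (PySem.Str.split? pddl_content key).getD []
  pvGusbkGo none all_lines

-- remove_the_last_end_bracket: scan i = 0,1,… i.e. index = len-1, len-2,…; truncate at first ')' line
def pvRbGo (lines : List String) (i : Nat) : List String :=
  if h : i < lines.length then
    let index := lines.length - i - 1
    if PySem.Str.strip lines[index]! == ")" then lines.take index
    else pvRbGo lines (i + 1)
  else lines
termination_by lines.length - i

def remove_the_last_end_bracket (lines : List String) : List String :=
  pvRbGo lines 0

-- clean_operator_lines inner per-block loop over block.split('\n')
def pvCleanBlockLine (line : String) : Option String :=
  if PySem.Str.isIn ";" line then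
    -- line.index(';') never raises here: ';' ∈ line, so find ≥ 0
    let line := PySem.Str.slice line none (some (PySem.Str.find line ";"))
    if PySem.Str.len (PySem.Str.strip line) == 0 then none else some line
  else some line

def pvCleanBlock (block : String) : String :=
  let new_lines := ((PySem.Str.split? block "\n").getD []).filterMap pvCleanBlockLine
  let new_lines :=
    -- new_lines[-2] is in range: guarded by len(new_lines) > 2
    if new_lines.length > 2 && PySem.Str.isIn ")" ((PySem.List.pyGet? new_lines (-2)).getD "") then
      new_lines ++ [" "]
    else new_lines
  PySem.Str.join "\n" new_lines

def clean_operator_lines (lines : List String) (return_blocks : Bool) : List String :=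
  let key1 := "(:action "
  let key2 := "(:derived "
  let lines := PySem.Str.replace (PySem.Str.join "" lines) key2 "(:action (:derived "
  let blocks := get_uncommented_splits_by_key lines key1
  let new_blocks := blocks.map pvCleanBlock
  if return_blocks then
    (blocks.drop 1).map (fun s => if !(PySem.Str.startswith s key2) then key1 ++ s else s)
  else
    let lines := PySem.Str.replace (PySem.Str.join key1 new_blocks) "(:action (:derived " key2
    ((PySem.Str.split? lines "\n").getD []).map (fun l => l ++ "\n")

-- A's per-line state machine step: state = (header, predicates, functions, lines)
def pvAStep (s : List String × List String × Option (List String) × List String) (line : String) :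
    List String × List String × Option (List String) × List String :=
  let (header, predicates, functions, lines) := s
  if PySem.Str.isIn "(:predicates" line then
    (header ++ lines, predicates, functions, [])
  else if PySem.Str.isIn "(:functions" line then
    (header, predicates ++ remove_the_last_end_bracket lines, functions, [])
  else if PySem.Str.isIn "(:action" line && predicates.length == 0 then
    (header, predicates ++ remove_the_last_end_bracket lines, some [], [line])
  else if PySem.Str.isIn "(:action" line && functions.isNone then
    (header, predicates, some lines, [line])
  else
    (header, predicates, functions, lines ++ [line])

def parse_domain (domain_lines : List String) : List String × List String × Option (List String) × List String :=
  let (header, predicates, functions, lines) := domain_lines.foldl pvAStep ([], [], none, [])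
  (header, predicates, functions, clean_operator_lines (remove_the_last_end_bracket lines) false)

-- ===== PORT B =====
-- a line is an effective marker in the current state (predicates, functions)
def pvActive (predicates : List String) (functions : Option (List String)) (ln : String) : Bool :=
  PySem.Str.isIn "(:predicates" ln || PySem.Str.isIn "(:functions" ln ||
    (PySem.Str.isIn "(:action" ln && (predicates.isEmpty || functions.isNone))

-- B's marker-jump loop: find the next effective marker, move the whole slice before it
-- (findIdx returns rest.length when no line matches = the `None` default of Source B's next(...))
def pvBLoop (header predicates : List String) (functions : Option (List String))
    (pending rest : List String) : List String × List String × Option (List String) × List String :=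
  let i := rest.findIdx (pvActive predicates functions)
  if _h : i < rest.length then
    let seg := pending ++ rest.take i
    let line := (rest[i]?).getD ""   -- in range: i < rest.length
    let rest' := rest.drop (i + 1)
    if PySem.Str.isIn "(:predicates" line then
      pvBLoop (header ++ seg) predicates functions [] rest'
    else if PySem.Str.isIn "(:functions" line then
      pvBLoop header (predicates ++ remove_the_last_end_bracket seg) functions [] rest'
    else if predicates.isEmpty then
      pvBLoop header (predicates ++ remove_the_last_end_bracket seg) (some []) [line] rest'
    else
      pvBLoop header predicates (some seg) [line] rest'
  else (header, predicates, functions, pending ++ rest)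
termination_by rest.length
decreasing_by all_goals (simp only [List.length_drop]; omega)

def parse_domain_alt (domain_lines : List String) : List String × List String × Option (List String) × List String :=
  let (header, predicates, functions, tail) := pvBLoop [] [] none [] domain_lines
  (header, predicates, functions, clean_operator_lines (remove_the_last_end_bracket tail) false)

-- ===== PRECONDITION & SPEC =====
def Spec_parse_domain (domain_lines : List String) (out : List String × List String × Option (List String) × List String) : Prop := out = parse_domain_alt domain_lines
instance (domain_lines : List String) (out : List String × List String × Option (List String) × List String) : Decidable (Spec_parse_domain domain_lines out) := by unfold Spec_parse_domain; infer_instance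

-- ===== CLAIM (what is proved, stated in full; the proofs are below) =====
def Claim_equal_parse_domain : Prop := ∀ (domain_lines : List String), Dom_parse_domain domain_lines → Spec_parse_domain domain_lines (parse_domain domain_lines)

-- ===== LEMMAS AND PROOFS =====

-- shift lemma: a non-marker line just joins the pending slice
theorem pvBLoop_shift (header predicates : List String) (functions : Option (List String))
    (pending rest : List String) (x : String) (hx : pvActive predicates functions x = false) :
    pvBLoop header predicates functions pending (x :: rest) =
      pvBLoop header predicates functions (pending ++ [x]) rest := by
  have hidx : (x :: rest).findIdx (pvActive predicates functions)
      = rest.findIdx (pvActive predicates functions) + 1 := by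
    simp [List.findIdx_cons, hx]
  rw [pvBLoop]
  conv_rhs => rw [pvBLoop]
  simp only [hidx, List.length_cons, Nat.add_lt_add_iff_right, List.take_succ_cons,
    List.getElem?_cons_succ, List.drop_succ_cons, List.cons_append, List.nil_append,
    List.append_assoc]

theorem pvBLoop_marker (header predicates : List String) (functions : Option (List String))
    (pending rest : List String) (x : String) (hx : pvActive predicates functions x = true) :
    pvBLoop header predicates functions pending (x :: rest) =
      (if PySem.Str.isIn "(:predicates" x then
        pvBLoop (header ++ pending) predicates functions [] rest
      else if PySem.Str.isIn "(:functions" x then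
        pvBLoop header (predicates ++ remove_the_last_end_bracket pending) functions [] rest
      else if predicates.isEmpty then
        pvBLoop header (predicates ++ remove_the_last_end_bracket pending) (some []) [x] rest
      else
        pvBLoop header predicates (some pending) [x] rest) := by
  have hidx : (x :: rest).findIdx (pvActive predicates functions) = 0 := by
    simp [List.findIdx_cons, hx]
  rw [pvBLoop]
  simp only [hidx, List.length_cons, Nat.zero_lt_succ, dif_pos, List.take_zero,
    List.getElem?_cons_zero, Option.getD_some, List.drop_succ_cons, List.drop_zero,
    List.append_nil]

-- the core invariant: A's fold over the remaining lines equals B's marker-jump loop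
theorem pvLoop_eq (rest : List String) :
    ∀ (header predicates : List String) (functions : Option (List String)) (buf : List String),
      rest.foldl pvAStep (header, predicates, functions, buf) =
        pvBLoop header predicates functions buf rest := by
  induction rest with
  | nil =>
    intro header predicates functions buf
    rw [pvBLoop]
    simp
  | cons x rest ih =>
    intro header predicates functions buf
    rw [List.foldl_cons]
    cases hx : pvActive predicates functions x with
    | false =>
      rw [pvBLoop_shift _ _ _ _ _ _ hx, ← ih]
      have h := hx
      unfold pvActive at h
      simp only [Bool.or_eq_false_iff, Bool.and_eq_false_iff] at h
      obtain ⟨⟨h1, h2⟩, h3⟩ := h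
      unfold pvAStep
      rcases h3 with h3 | h3
      · simp only [h1, h2, h3, Bool.false_eq_true, if_false, Bool.false_and]
      · obtain ⟨hp, hf⟩ := h3
        have hp' : (predicates.length == 0) = false := by
          cases predicates <;> simp_all
        simp only [h1, h2, hp', hf, Bool.false_eq_true, if_false, Bool.and_false]
    | true =>
      rw [pvBLoop_marker _ _ _ _ _ _ hx]
      by_cases h1 : PySem.Str.isIn "(:predicates" x = true
      · rw [if_pos h1, ← ih]
        unfold pvAStep
        simp only [h1, if_true]
      · have h1' : PySem.Str.isIn "(:predicates" x = false := by
          cases hv : PySem.Str.isIn "(:predicates" x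
          · rfl
          · exact absurd hv h1
        by_cases h2 : PySem.Str.isIn "(:functions" x = true
        · rw [if_neg (by rw [h1']; simp), if_pos h2, ← ih]
          unfold pvAStep
          simp only [h1', h2, Bool.false_eq_true, if_false, if_true]
        · have h2' : PySem.Str.isIn "(:functions" x = false := by
            cases hv : PySem.Str.isIn "(:functions" x
            · rfl
            · exact absurd hv h2
          have hact : PySem.Str.isIn "(:action" x = true
              ∧ (predicates.isEmpty = true ∨ functions.isNone = true) := by
            have h := hx
            unfold pvActive at h
            simp only [h1', h2', Bool.false_or, Bool.and_eq_true, Bool.or_eq_true] at h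
            exact h
          rw [if_neg (by rw [h1']; simp), if_neg (by rw [h2']; simp)]
          by_cases hp : predicates = []
          · rw [if_pos (by simp [hp]), ← ih]
            unfold pvAStep
            simp only [h1', h2', hact.1, hp, Bool.false_eq_true, if_false, List.length_nil,
              BEq.rfl, Bool.and_true, Bool.true_and, if_true]
          · have hf : functions = none := by
              rcases hact.2 with h | h
              · exact absurd (List.isEmpty_iff.mp h) hp
              · exact Option.isNone_iff_eq_none.mp h
            have hp' : (predicates.length == 0) = false := by cases predicates <;> simp_all
            rw [if_neg (by simp [List.isEmpty_iff, hp]), ← ih]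
            unfold pvAStep
            simp only [h1', h2', hact.1, hp', hf, Bool.false_eq_true, if_false, Bool.and_false,
              Option.isNone_none, Bool.and_true, if_true]

-- ===== VERDICT (by name: the statement is the Claim_ definition above) =====
theorem parse_domain_spec : Claim_equal_parse_domain := by
  intro domain_lines _
  unfold Spec_parse_domain parse_domain parse_domain_alt
  rw [pvLoop_eq]
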